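-- pv_equiv track=rewrite | github.com/zhang677/PCL-lite | reinforce/actions.py | check_ref_code
-- ===== SOURCE A (Python) =====
-- def check_ref_code(ref_code_list, input_code):
--     input_code_list = input_code.split("\n")
--     ref_code_exist = []
--     for ref_code in ref_code_list:
--         exist = False
--         for input_segment in input_code_list:
--             if ref_code in input_segment:
--                 exist = True
--                 break
--         ref_code_exist.append(exist)
--     if all(ref_code_exist):
--         return True
--     return False
-- ===== SOURCE B (Python) =====
-- def check_ref_code(ref_code_list, input_code):
--     remaining = set(ref_code_list)
--     for line in input_code.split("\n"):
--         for ref in list(remaining):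
--             if ref in line:
--                 remaining.discard(ref)
--         if not remaining:
--             break
--     return not remaining
-- ===== Notes on version B (the rewrite author's own statement) =====
-- stated objective: alternative
-- what changed: Replaces A's ref-outer/line-inner boolean-list accumulation with a line-outer scan that shrinks a set of still-unfound refs and breaks early once it is empty.
import Mathlib
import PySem

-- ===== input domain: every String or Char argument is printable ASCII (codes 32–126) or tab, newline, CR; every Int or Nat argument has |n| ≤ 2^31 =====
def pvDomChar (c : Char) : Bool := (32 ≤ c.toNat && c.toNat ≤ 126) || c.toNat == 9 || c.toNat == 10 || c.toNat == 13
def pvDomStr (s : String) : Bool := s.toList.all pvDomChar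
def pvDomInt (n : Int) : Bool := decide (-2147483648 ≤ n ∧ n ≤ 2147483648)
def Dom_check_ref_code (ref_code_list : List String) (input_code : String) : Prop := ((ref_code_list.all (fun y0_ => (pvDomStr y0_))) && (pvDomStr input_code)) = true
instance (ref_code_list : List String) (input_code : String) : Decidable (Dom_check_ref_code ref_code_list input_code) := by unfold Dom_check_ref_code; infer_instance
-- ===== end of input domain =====

-- B changes the traversal: a line-outer scan shrinking a set of still-unfound refs (with early exit), instead of A's ref-outer boolean accumulation; same cost (objective: alternative).

-- ===== PORT A =====
-- inner 'for input_segment in input_code_list: if ref_code in input_segment: exist = True; break'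
def pvAInner (ref : String) : List String → Bool
  | [] => false
  | seg :: rest => if PySem.Str.isIn ref seg then true else pvAInner ref rest

def check_ref_code (ref_code_list : List String) (input_code : String) : Bool :=
  -- input_code.split("\n"): the separator is the non-empty literal "\n", so split? is always `some`
  let input_code_list := (PySem.Str.split? input_code "\n").getD []
  let ref_code_exist := ref_code_list.foldl (fun acc ref => acc ++ [pvAInner ref input_code_list]) []
  if ref_code_exist.all (fun b => b) then true else false

-- ===== PORT B =====
-- 'for line in lines: remove from remaining every ref contained in line; break when remaining is empty'
def pvBLoop (lines : List String) (remaining : List String) : List String :=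
  match lines with
  | [] => remaining
  | l :: ls =>
      let rem := remaining.filter (fun r => !PySem.Str.isIn r l)
      if rem.isEmpty then rem else pvBLoop ls rem

def check_ref_code_alt (ref_code_list : List String) (input_code : String) : Bool :=
  (pvBLoop ((PySem.Str.split? input_code "\n").getD []) (PySem.Set.ofList ref_code_list)).isEmpty

-- ===== PRECONDITION & SPEC =====
def Spec_check_ref_code (ref_code_list : List String) (input_code : String) (out : Bool) : Prop := out = check_ref_code_alt ref_code_list input_code
instance (ref_code_list : List String) (input_code : String) (out : Bool) : Decidable (Spec_check_ref_code ref_code_list input_code out) := by unfold Spec_check_ref_code; infer_instance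

-- ===== CLAIM (what is proved, stated in full; the proofs are below) =====
def Claim_equal_check_ref_code : Prop := ∀ (ref_code_list : List String) (input_code : String), Dom_check_ref_code ref_code_list input_code → Spec_check_ref_code ref_code_list input_code (check_ref_code ref_code_list input_code)

-- ===== LEMMAS AND PROOFS =====

-- A's inner loop with break is List.any
theorem pvAInner_eq_any (ref : String) (lines : List String) :
    pvAInner ref lines = lines.any (fun l => PySem.Str.isIn ref l) := by
  induction lines with
  | nil => rfl
  | cons l ls ih =>
      simp only [pvAInner, List.any_cons, ih, PySem.Str.isIn_eq]
      by_cases h : PySem.Chars.isIn ref.toList l.toList = true <;> simp [h]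

-- B's loop returns exactly the refs contained in no line (the early break drops nothing: filtering [] gives [])
theorem pvBLoop_eq_filter (lines : List String) (rem : List String) :
    pvBLoop lines rem = rem.filter (fun r => lines.all (fun l => !PySem.Str.isIn r l)) := by
  induction lines generalizing rem with
  | nil => simp [pvBLoop]
  | cons l ls ih =>
      simp only [pvBLoop]
      split_ifs with h
      · rw [List.isEmpty_iff] at h
        rw [h]
        symm
        rw [List.filter_eq_nil_iff]
        intro a ha hall
        simp only [List.all_cons, Bool.and_eq_true] at hall
        have hmem : a ∈ List.filter (fun r => !PySem.Str.isIn r l) rem :=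
          List.mem_filter.mpr ⟨ha, hall.1⟩
        rw [h] at hmem
        exact absurd hmem (List.not_mem_nil)
      · rw [ih, List.filter_filter]
        congr 1
        funext r
        simp [List.all_cons, Bool.and_comm]

-- A's result as one boolean formula
theorem check_ref_code_eq_all (refs : List String) (ic : String) :
    check_ref_code refs ic =
      refs.all (fun r => ((PySem.Str.split? ic "\n").getD []).any (fun l => PySem.Str.isIn r l)) := by
  unfold check_ref_code
  simp only [PySem.List.foldl_append_singleton_eq_map, List.nil_append, List.all_map,
    pvAInner_eq_any]
  split_ifs with h <;> simp_all

-- ===== VERDICT (by name: the statement is the Claim_ definition above) =====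
theorem check_ref_code_spec : Claim_equal_check_ref_code := by
  intro refs ic _
  unfold Spec_check_ref_code check_ref_code_alt
  rw [check_ref_code_eq_all, pvBLoop_eq_filter, Bool.eq_iff_iff]
  simp only [List.isEmpty_iff, List.filter_eq_nil_iff, PySem.Set.mem_ofList,
    List.all_eq_true, List.any_eq_true]
  simp
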